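-- pv_equiv track=rewrite | github.com/deus09/chatapp | trace/trace.py | seperateKeyAndEncryptedText
-- ===== SOURCE A (Python) =====
-- def seperateKeyAndEncryptedText(Encrypted):
-- 	key=""
-- 	encrypted=""
-- 	flag=1
-- 	for i in range(len(Encrypted)):
-- 		if Encrypted[i]=='$':
-- 			flag=0
-- 			continue
-- 		if flag:
-- 			key+=Encrypted[i]
-- 		else:
-- 			encrypted+=Encrypted[i]
-- 	return [key,encrypted]
-- ===== SOURCE B (Python) =====
-- def seperateKeyAndEncryptedText(Encrypted):
-- 	key, _sep, rest = Encrypted.partition('$')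
-- 	return [key, rest.replace('$', '')]
-- ===== Notes on version B (the rewrite author's own statement) =====
-- stated objective: simpler
-- what changed: Replaces the char-by-char flag loop with str.partition at the first '$' plus one replace('$','') to strip remaining '$' from the tail.
import Mathlib
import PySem

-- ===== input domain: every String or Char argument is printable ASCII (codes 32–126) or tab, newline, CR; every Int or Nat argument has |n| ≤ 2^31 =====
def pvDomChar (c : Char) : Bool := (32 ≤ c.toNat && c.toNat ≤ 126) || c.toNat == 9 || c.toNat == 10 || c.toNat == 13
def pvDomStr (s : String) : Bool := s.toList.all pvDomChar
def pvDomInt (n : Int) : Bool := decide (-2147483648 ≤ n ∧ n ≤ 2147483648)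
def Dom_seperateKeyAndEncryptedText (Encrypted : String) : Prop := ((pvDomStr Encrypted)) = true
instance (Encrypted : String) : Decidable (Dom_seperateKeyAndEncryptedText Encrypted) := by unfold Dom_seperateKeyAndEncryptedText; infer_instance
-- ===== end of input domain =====

-- B replaces A's char-by-char flag loop by partition at the first '$' plus replace('$','') on the tail (objective: simpler).

-- ===== PORT A =====
-- A's loop: key/encrypted accumulated char by char ('+=' appends one char), flag cleared at the first '$'.
def sepLoop : List Char → List Char → List Char → Bool → List Char × List Char
  | [], key, enc, _ => (key, enc)
  | c :: cs, key, enc, flag =>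
    if c = '$' then sepLoop cs key enc false
    else if flag then sepLoop cs (key ++ [c]) enc flag
    else sepLoop cs key (enc ++ [c]) flag

def seperateKeyAndEncryptedText (Encrypted : String) : List String :=
  let r := sepLoop Encrypted.toList [] [] true
  [String.ofList r.1, String.ofList r.2]

-- ===== PORT B =====
-- Source B: key, _sep, rest = Encrypted.partition('$'); return [key, rest.replace('$','')]
-- str.partition is not in PySem; it is ported by hand, exactly: find the first '$',
-- and split with slices (no '$' found ⇒ (s, '', '')), which is CPython's partition.
def seperateKeyAndEncryptedText_alt (Encrypted : String) : List String :=
  let i := PySem.Str.find Encrypted "$"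
  let key := if i = -1 then Encrypted else PySem.Str.slice Encrypted none (some i)
  let rest := if i = -1 then "" else PySem.Str.slice Encrypted (some (i + 1)) none
  [key, PySem.Str.replace rest "$" ""]

-- ===== PRECONDITION & SPEC =====
def Spec_seperateKeyAndEncryptedText (Encrypted : String) (out : List String) : Prop := out = seperateKeyAndEncryptedText_alt Encrypted
instance (Encrypted : String) (out : List String) : Decidable (Spec_seperateKeyAndEncryptedText Encrypted out) := by unfold Spec_seperateKeyAndEncryptedText; infer_instance

-- ===== CLAIM (what is proved, stated in full; the proofs are below) =====
def Claim_equal_seperateKeyAndEncryptedText : Prop := ∀ (Encrypted : String), Dom_seperateKeyAndEncryptedText Encrypted → Spec_seperateKeyAndEncryptedText Encrypted (seperateKeyAndEncryptedText Encrypted)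

-- ===== LEMMAS AND PROOFS =====

-- A's loop once the flag is cleared: everything except '$' goes to enc.
theorem sepLoop_false (cs key enc) :
    sepLoop cs key enc false = (key, enc ++ cs.filter (· ≠ '$')) := by
  induction cs generalizing enc with
  | nil => simp [sepLoop]
  | cons c cs ih =>
    by_cases h : c = '$' <;> simp [sepLoop, h, ih]

-- A's loop while the flag is set: key gets the prefix before the first '$',
-- enc gets the rest with every '$' filtered out.
theorem sepLoop_true (cs key enc) :
    sepLoop cs key enc true =
      (key ++ cs.takeWhile (· ≠ '$'), enc ++ (cs.dropWhile (· ≠ '$')).filter (· ≠ '$')) := by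
  induction cs generalizing key with
  | nil => simp [sepLoop]
  | cons c cs ih =>
    by_cases h : c = '$'
    · simp [sepLoop, h, sepLoop_false, List.takeWhile, List.dropWhile]
    · simp [sepLoop, h, ih, List.takeWhile, List.dropWhile]

-- replace('$','') removes every '$': the fuelled go-loop is a filter.
theorem replace_go_dollar (fuel : Nat) (l acc : List Char) (hf : l.length ≤ fuel) :
    PySem.Chars.replace.go ['$'] [] fuel l acc = acc.reverse ++ l.filter (· ≠ '$') := by
  induction fuel generalizing l acc with
  | zero =>
    have : l = [] := List.eq_nil_of_length_eq_zero (Nat.le_zero.mp hf)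
    simp [this, PySem.Chars.replace.go]
  | succ n ih =>
    cases l with
    | nil => simp [PySem.Chars.replace.go]
    | cons c cs =>
      have h1 : cs.length ≤ n := by simpa using hf
      by_cases h : c = '$'
      · simpa [PySem.Chars.replace.go, h, List.isPrefixOf] using ih cs acc h1
      · have h' : ¬('$' = c) := fun hh => h hh.symm
        simp [PySem.Chars.replace.go, List.isPrefixOf, h, h', ih cs (c :: acc) h1]

theorem replace_dollar (l : List Char) :
    PySem.Chars.replace l ['$'] [] = l.filter (· ≠ '$') := by
  simp [PySem.Chars.replace, replace_go_dollar l.length l [] le_rfl]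

-- find('$') returns the length of the '$'-free prefix, or -1.
theorem find_go_dollar (l : List Char) (k : Nat) :
    PySem.Chars.find.go ['$'] l k =
      if '$' ∈ l then ((k : Int) + (l.takeWhile (· ≠ '$')).length) else -1 := by
  induction l generalizing k with
  | nil => simp [PySem.Chars.find.go]
  | cons c cs ih =>
    by_cases h : c = '$'
    · simp [PySem.Chars.find.go, List.isPrefixOf, h, List.takeWhile]
    · have h' : ¬('$' = c) := fun hh => h hh.symm
      by_cases hm : '$' ∈ cs
      · simp [PySem.Chars.find.go, List.isPrefixOf, h, h', ih (k + 1), hm, List.takeWhile]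
        omega
      · simp [PySem.Chars.find.go, List.isPrefixOf, h, h', ih (k + 1), hm, List.takeWhile]

theorem find_dollar (l : List Char) :
    PySem.Chars.find l ['$'] =
      if '$' ∈ l then ((l.takeWhile (· ≠ '$')).length : Int) else -1 := by
  simpa using find_go_dollar l 0

theorem takeWhile_eq_take {α : Type} (p : α → Bool) (l : List α) :
    l.takeWhile p = l.take (l.takeWhile p).length := by
  induction l with
  | nil => simp
  | cons c cs ih =>
    by_cases h : p c
    · rw [List.takeWhile_cons_of_pos h]
      simp only [List.length_cons, List.take_succ_cons]
      exact congrArg (c :: ·) ih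
    · simp [List.takeWhile_cons_of_neg h]

theorem dropWhile_eq_drop {α : Type} (p : α → Bool) (l : List α) :
    l.dropWhile p = l.drop (l.takeWhile p).length := by
  induction l with
  | nil => simp
  | cons c cs ih => by_cases h : p c <;>
      simp [List.takeWhile_cons_of_pos, List.takeWhile_cons_of_neg,
        List.dropWhile_cons_of_pos, List.dropWhile_cons_of_neg, h, ih]

theorem dropWhile_head_not {α : Type} (p : α → Bool) (l : List α) (a : α) (as : List α)
    (h : l.dropWhile p = a :: as) : p a = false := by
  induction l with
  | nil => simp at h
  | cons c cs ih =>
    by_cases hc : p c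
    · exact ih (by simpa [List.dropWhile_cons_of_pos hc] using h)
    · rw [List.dropWhile_cons_of_neg hc] at h
      cases h
      simpa using hc

-- ===== VERDICT (by name: the statement is the Claim_ definition above) =====
theorem seperateKeyAndEncryptedText_spec : Claim_equal_seperateKeyAndEncryptedText := by
  intro E _
  unfold Spec_seperateKeyAndEncryptedText seperateKeyAndEncryptedText seperateKeyAndEncryptedText_alt
  dsimp only
  set l := E.toList with hl
  rw [sepLoop_true]
  by_cases hm : '$' ∈ l
  · -- a '$' occurs: find returns the takeWhile length t
    set t := (l.takeWhile (· ≠ '$')).length with htdef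
    have hfind : PySem.Str.find E "$" = (t : Int) := by
      simp only [PySem.Str.find, ← hl]
      rw [show ("$".toList) = ['$'] from rfl, find_dollar, if_pos hm]
    have hne : ¬((t : Int) = -1) := by omega
    have hdw_ne : l.dropWhile (· ≠ '$') ≠ [] := by
      intro h0
      rw [List.dropWhile_eq_nil_iff] at h0
      have := h0 '$' hm
      simp at this
    cases hdw : l.dropWhile (· ≠ '$') with
    | nil => exact absurd hdw hdw_ne
    | cons a as =>
      have ha : a = '$' := by
        have h2 := dropWhile_head_not _ _ _ _ hdw
        simpa using h2
      have hdrop : l.drop t = a :: as := by rw [← dropWhile_eq_drop, hdw]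
      have hdrop1 : l.drop (t + 1) = as := by
        rw [← List.drop_drop, hdrop]
        simp
      have hkey : PySem.Str.slice E none (some (t : Int)) = String.ofList (l.takeWhile (· ≠ '$')) := by
        simp only [PySem.Str.slice, PySem.Chars.slice, ← hl, PySem.List.slice_to_natCast]
        rw [← takeWhile_eq_take]
      have hrest : PySem.Str.slice E (some ((t : Int) + 1)) none = String.ofList as := by
        simp only [PySem.Str.slice, PySem.Chars.slice, ← hl]
        rw [show ((t : Int) + 1) = ((t + 1 : Nat) : Int) by push_cast; ring,
          PySem.List.slice_from_natCast, hdrop1]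
      have hfilter : (a :: as).filter (· ≠ '$') = as.filter (· ≠ '$') := by
        simp [List.filter, ha]
      rw [hfind, hfilter, if_neg hne, if_neg hne, hkey, hrest]
      rw [PySem.Str.replace]
      simp [replace_dollar]
  · -- no '$': key is the whole string, encrypted is empty
    have hfind : PySem.Str.find E "$" = -1 := by
      simp only [PySem.Str.find, ← hl]
      rw [show ("$".toList) = ['$'] from rfl, find_dollar]
      simp [hm]
    have h1 : l.takeWhile (· ≠ '$') = l := by
      rw [List.takeWhile_eq_self_iff]
      intro a ha
      simp only [ne_eq, decide_eq_true_eq]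
      rintro rfl
      exact hm ha
    have h2 : l.dropWhile (· ≠ '$') = [] := by
      rw [List.dropWhile_eq_nil_iff]
      intro a ha
      simp only [ne_eq, decide_eq_true_eq]
      rintro rfl
      exact hm ha
    rw [hfind, h1, h2]
    simp [PySem.Str.replace, replace_dollar, hl, String.ofList_toList]
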